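-- pv_equiv track=rewrite | github.com/matteonu/ACLabs | Lab 8/M2/remote.py | exact_int_root
-- ===== SOURCE A (Python) =====
-- def exact_int_root(radicand, k):
--     ''' Computes the int root such that root ** k == radicand and root == None if this doesn't exist
--
--     >>> exact_int_root(9, 3)
--     >>> exact_int_root(64, 3)
--     4
--     >>> exact_int_root(16269, 27743)
--     >>> exact_int_root(163956, 30674)
--     >>> exact_int_root(8, 3)
--     2
--     '''
--
--     if radicand < 0 or k < 0:
--         raise ValueError('exact_int_root is undefined for negative numbers')
--
--     if k == 0:
--         raise ValueError('exact_int_root is undefined for k == 0 (1/k == 1/0)')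
--
--
--     # The following are needed to make sure that root < radicand
--     # otherwise upper_bound = radicand causes an error
--
--     if radicand in (0, 1):
--         return radicand
--     elif k == 1:
--         return radicand
--
--     # test if k is too big to enable any solution
--     # Not required, but it can speed up silly cases
--     if k >= radicand or 2 ** k > radicand:
--         return None
--
--     # Can improve by finding a better approximation but you have to be cautious
--     # That you always make sure the approximation fulfills
--     # lower_bound <= root < upper_bound
--     lower_bound = 0
--     upper_bound = radicand
--
--     # Binary search for root
--     root_guess = (lower_bound + upper_bound) // 2
--     while upper_bound - lower_bound > 0:
--         radicand_guess = root_guess ** k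
--
--         if radicand_guess < radicand:
--             # add 1 because lower_bound should be the smallest *possible* guess for root
--             # and we just ruled out root_guess.
--             lower_bound = root_guess + 1
--         elif radicand_guess == radicand:
--             return root_guess
--         else:
--             upper_bound = root_guess
--
--         root_guess = (lower_bound + upper_bound) // 2
--     # No more valid guesses exist
--     return None
-- ===== SOURCE B (Python) =====
-- def exact_int_root(radicand, k):
--     '''Digit-by-digit binary root extraction (build the root bit by bit) instead of bisection.'''
--     if radicand < 0 or k < 0:
--         raise ValueError('exact_int_root is undefined for negative numbers')
--     if k == 0:
--         raise ValueError('exact_int_root is undefined for k == 0 (1/k == 1/0)')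
--     if radicand in (0, 1) or k == 1:
--         return radicand
--     root = 0
--     for shift in reversed(range(radicand.bit_length() // k + 1)):
--         candidate = root + (1 << shift)
--         if candidate ** k <= radicand:
--             root = candidate
--     return root if root ** k == radicand else None
-- ===== Notes on version B (the rewrite author's own statement) =====
-- stated objective: alternative
-- what changed: Replaces the binary search over the interval [0, radicand) by a digit-by-digit construction of the integer k-th root: starting from 0 the root is built bit by bit from the highest possible bit (from radicand.bit_length() // k) downward, then checked exactly once against radicand; this also drops A's 2**k pre-test, which B never needs.
import Mathlib
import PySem

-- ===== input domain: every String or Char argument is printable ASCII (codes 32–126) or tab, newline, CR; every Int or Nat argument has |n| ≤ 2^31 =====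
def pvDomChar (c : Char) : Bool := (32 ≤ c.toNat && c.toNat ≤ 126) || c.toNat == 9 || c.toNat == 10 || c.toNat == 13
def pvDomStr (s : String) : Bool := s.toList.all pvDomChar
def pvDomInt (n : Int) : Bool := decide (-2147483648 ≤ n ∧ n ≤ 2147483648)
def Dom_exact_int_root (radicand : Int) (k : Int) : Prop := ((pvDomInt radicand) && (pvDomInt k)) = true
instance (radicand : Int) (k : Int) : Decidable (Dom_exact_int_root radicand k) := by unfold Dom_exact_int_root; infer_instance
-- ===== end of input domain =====

-- B replaces A's bisection by a digit-by-digit (bit-by-bit) construction of the integer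
-- k-th root followed by one exactness check; the proof shows both return the same Option.

-- ===== PORT A =====
-- A's while loop: 'root_guess = (lb+ub)//2' before the loop and at the end of every
-- iteration = the midpoint is computed at the head of each iteration.
def pvALoop (radicand k lb ub : Int) : Option Int :=
  if h : ub - lb > 0 then
    let root_guess := PySem.Int.floordiv (lb + ub) 2
    let radicand_guess := root_guess ^ k.toNat
    if radicand_guess < radicand then
      pvALoop radicand k (root_guess + 1) ub
    else if radicand_guess = radicand then
      some root_guess
    else
      pvALoop radicand k lb root_guess
  else none
  termination_by (ub - lb).toNat
  decreasing_by
  · have h1 := (PySem.Int.floordiv_two_mid_bounds (lo := lb) (hi := ub) (by omega)).1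
    omega
  · have h2 := PySem.Int.floordiv_lt_iff_lt_mul (a := lb + ub) (b := 2) (q := ub) (by omega)
    omega

def exact_int_root (radicand : Int) (k : Int) : Option Int :=
  -- radicand < 0, k < 0 and k == 0 raise ValueError: outside Pre_
  if radicand = 0 ∨ radicand = 1 then some radicand
  else if k = 1 then some radicand
  else if k ≥ radicand ∨ 2 ^ k.toNat > radicand then none
  else pvALoop radicand k 0 radicand

-- ===== PORT B =====
-- 'for shift in reversed(range(e)):' — pvBLoop radicand k e root runs shift = e-1, …, 0.
def pvBLoop (radicand k : Int) (e : Nat) (root : Int) : Int :=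
  match e with
  | 0 => root
  | e' + 1 =>
    let candidate := root + (1 : Int) <<< e'   -- 1 << shift
    if candidate ^ k.toNat ≤ radicand then pvBLoop radicand k e' candidate
    else pvBLoop radicand k e' root

def exact_int_root_alt (radicand : Int) (k : Int) : Option Int :=
  if radicand = 0 ∨ radicand = 1 ∨ k = 1 then some radicand
  else
    let root := pvBLoop radicand k
      ((PySem.Int.floordiv (PySem.Int.bitLength radicand : Int) k).toNat + 1) 0
    if root ^ k.toNat = radicand then some root else none

-- ===== PRECONDITION & SPEC =====
-- Pre_ excludes exactly the inputs on which A raises ValueError (radicand < 0, k < 0, k == 0).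
def Pre_exact_int_root (radicand : Int) (k : Int) : Prop := 0 ≤ radicand ∧ 1 ≤ k
instance (radicand : Int) (k : Int) : Decidable (Pre_exact_int_root radicand k) := by
  unfold Pre_exact_int_root; infer_instance

def pvWitness_exact_int_root : Int × Int := (64, 3)

def Spec_exact_int_root (radicand : Int) (k : Int) (out : Option Int) : Prop := out = exact_int_root_alt radicand k
instance (radicand : Int) (k : Int) (out : Option Int) : Decidable (Spec_exact_int_root radicand k out) := by unfold Spec_exact_int_root; infer_instance

-- ===== CLAIM (what is proved, stated in full; the proofs are below) =====
def Claim_equal_exact_int_root : Prop := ∀ (radicand : Int) (k : Int), Dom_exact_int_root radicand k → Pre_exact_int_root radicand k → Spec_exact_int_root radicand k (exact_int_root radicand k)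

-- ===== LEMMAS AND PROOFS =====

theorem pv_one_shiftLeft (s : Nat) : (1 : Int) <<< s = 2 ^ s := by
  simp [Int.shiftLeft_eq]

-- strict monotonicity of x ^ K on 0 ≤ x
theorem pv_pow_lt_pow (K : Nat) (hK : K ≠ 0) {a b : Int} (ha : 0 ≤ a) (hab : a < b) :
    a ^ K < b ^ K := by
  exact pow_lt_pow_left₀ hab ha hK

-- B's loop keeps root^K ≤ radicand < (root + 2^e)^K; at e = 0 this says root is the floor root.
theorem pvBLoop_spec (radicand k : Int) (e : Nat) (root : Int)
    (h0 : 0 ≤ root) (hlo : root ^ k.toNat ≤ radicand)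
    (hhi : radicand < (root + 2 ^ e) ^ k.toNat) :
    0 ≤ pvBLoop radicand k e root ∧
    (pvBLoop radicand k e root) ^ k.toNat ≤ radicand ∧
    radicand < (pvBLoop radicand k e root + 1) ^ k.toNat := by
  induction e generalizing root with
  | zero =>
    rw [pvBLoop]
    exact ⟨h0, hlo, by simpa using hhi⟩
  | succ e' ih =>
    rw [pvBLoop]
    simp only [pv_one_shiftLeft]
    have h2 : root + 2 ^ e' + 2 ^ e' = root + 2 ^ (e' + 1) := by ring
    split
    · -- (root + 2^e')^K ≤ radicand : descend with candidate
      rename_i hc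
      exact ih (root + 2 ^ e') (by positivity) hc (by rw [h2]; exact hhi)
    · -- (root + 2^e')^K > radicand : keep root
      rename_i hc
      exact ih root h0 hlo (by omega)

-- if no nonnegative root exists, A's binary search returns none
theorem pvALoop_none (radicand k : Int) (hroot : ∀ r : Int, 0 ≤ r → r ^ k.toNat ≠ radicand) :
    ∀ lb ub : Int, 0 ≤ lb → pvALoop radicand k lb ub = none := by
  intro lb ub
  fun_induction pvALoop radicand k lb ub with
  | case1 lb ub h g rg hlt ih =>
    intro hlb
    have hgdef : g = PySem.Int.floordiv (lb + ub) 2 := rfl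
    have hmid := (PySem.Int.floordiv_two_mid_bounds (lo := lb) (hi := ub) (by omega)).1
    exact ih (by omega)
  | case2 lb ub h g rg hnlt heq =>
    intro hlb
    have hgdef : g = PySem.Int.floordiv (lb + ub) 2 := rfl
    have hmid := (PySem.Int.floordiv_two_mid_bounds (lo := lb) (hi := ub) (by omega)).1
    exact absurd heq (hroot g (by omega))
  | case3 lb ub h g rg hnlt hne ih =>
    intro hlb
    exact ih hlb
  | case4 lb ub h =>
    intro _
    rfl

-- if a root r lies in [lb, ub) with 0 ≤ lb, A's binary search finds exactly r
theorem pvALoop_some (radicand k : Int) (hK : k.toNat ≠ 0) (r : Int)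
    (hr0 : 0 ≤ r) (hr : r ^ k.toNat = radicand) :
    ∀ lb ub : Int, 0 ≤ lb → lb ≤ r → r < ub → pvALoop radicand k lb ub = some r := by
  intro lb ub
  fun_induction pvALoop radicand k lb ub with
  | case1 lb ub h g rg hlt ih =>
    intro hlb hlbr hrub
    have hgdef : g = PySem.Int.floordiv (lb + ub) 2 := rfl
    have hmid := (PySem.Int.floordiv_two_mid_bounds (lo := lb) (hi := ub) (by omega)).1
    have hgr : g < r := by
      by_contra hge
      push Not at hge
      have hle := pow_le_pow_left₀ hr0 hge k.toNat
      rw [hr] at hle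
      have : rg = g ^ k.toNat := rfl
      omega
    exact ih (by omega) (by omega) hrub
  | case2 lb ub h g rg hnlt heq =>
    intro hlb hlbr hrub
    have hgdef : g = PySem.Int.floordiv (lb + ub) 2 := rfl
    have hmid := (PySem.Int.floordiv_two_mid_bounds (lo := lb) (hi := ub) (by omega)).1
    have hrgdef : rg = g ^ k.toNat := rfl
    have hgeq : g = r := by
      rcases lt_trichotomy g r with hlt' | heq' | hgt'
      · have := pv_pow_lt_pow k.toNat hK (by omega : (0:Int) ≤ g) hlt'
        rw [hr] at this
        omega
      · exact heq'
      · have := pv_pow_lt_pow k.toNat hK hr0 hgt'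
        rw [hr] at this
        omega
    rw [hgeq]
  | case3 lb ub h g rg hnlt hne ih =>
    intro hlb hlbr hrub
    have hgdef : g = PySem.Int.floordiv (lb + ub) 2 := rfl
    have hmid := (PySem.Int.floordiv_two_mid_bounds (lo := lb) (hi := ub) (by omega)).1
    have hrgdef : rg = g ^ k.toNat := rfl
    have hrg : r < g := by
      by_contra hge
      push Not at hge
      have hle := pow_le_pow_left₀ (by omega : (0:Int) ≤ g) hge k.toNat
      rw [hr] at hle
      omega
    exact ih hlb hlbr hrg
  | case4 lb ub h =>
    intro hlb hlbr hrub
    omega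

-- the floor root characterises the unique exact root
theorem pv_root_unique (K : Nat) (hK : K ≠ 0) (radicand f r : Int)
    (hf0 : 0 ≤ f) (hfle : f ^ K ≤ radicand) (hflt : radicand < (f + 1) ^ K)
    (hr0 : 0 ≤ r) (hr : r ^ K = radicand) : r = f := by
  rcases lt_trichotomy r f with hlt | heq | hgt
  · have := pv_pow_lt_pow K hK hr0 hlt
    rw [hr] at this
    omega
  · exact heq
  · have hge : f + 1 ≤ r := by omega
    have := pow_le_pow_left₀ (by omega : (0:Int) ≤ f + 1) hge K
    rw [hr] at this
    omega

-- ===== VERDICT (by name: the statement is the Claim_ definition above) =====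
theorem exact_int_root_spec : Claim_equal_exact_int_root := by
  intro radicand k _ hpre
  obtain ⟨hrad, hk⟩ := hpre
  show exact_int_root radicand k = exact_int_root_alt radicand k
  by_cases h01 : radicand = 0 ∨ radicand = 1
  · simp only [exact_int_root, exact_int_root_alt, if_pos h01,
      if_pos (Or.elim h01 (fun h => Or.inl h) (fun h => Or.inr (Or.inl h)))]
  by_cases hk1 : k = 1
  · simp only [exact_int_root, exact_int_root_alt, if_neg h01, if_pos hk1,
      if_pos (Or.inr (Or.inr hk1))]
  -- main case: radicand ≥ 2, k ≥ 2
  have hrad2 : 2 ≤ radicand := by omega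
  have hk2 : 2 ≤ k := by omega
  have hK2 : 2 ≤ k.toNat := by omega
  have hK0 : k.toNat ≠ 0 := by omega
  -- B's floor root
  have hediv : (PySem.Int.floordiv (PySem.Int.bitLength radicand : Int) k).toNat + 1
      = PySem.Int.bitLength radicand / k.toNat + 1 := by
    have hcast : ((k.toNat : Nat) : Int) = k := by omega
    rw [← hcast, PySem.Int.floordiv_natCast]
    simp only [Int.toNat_natCast]
  have hstart : radicand < ((0:Int) + 2 ^ (PySem.Int.bitLength radicand / k.toNat + 1)) ^ k.toNat := by
    set s := PySem.Int.bitLength radicand with hs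
    have h1 : radicand.natAbs < 2 ^ s := PySem.Int.lt_two_pow_bitLength radicand
    have h2 : s < (s / k.toNat + 1) * k.toNat := by
      have := Nat.div_add_mod s k.toNat
      have := Nat.mod_lt s (y := k.toNat) (by omega)
      nlinarith [Nat.div_add_mod s k.toNat]
    have h3 : (2:Nat) ^ s < 2 ^ ((s / k.toNat + 1) * k.toNat) :=
      Nat.pow_lt_pow_right (by omega) h2
    have h4 : radicand.natAbs < 2 ^ ((s / k.toNat + 1) * k.toNat) := by omega
    have h5 : radicand = ((radicand.natAbs : Nat) : Int) := by omega
    rw [zero_add, ← pow_mul]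
    calc radicand = ((radicand.natAbs : Nat) : Int) := h5
      _ < ((2 ^ ((s / k.toNat + 1) * k.toNat) : Nat) : Int) := by exact_mod_cast h4
      _ = (2:Int) ^ ((s / k.toNat + 1) * k.toNat) := by push_cast; ring
  have hB := pvBLoop_spec radicand k (PySem.Int.bitLength radicand / k.toNat + 1) 0
    le_rfl (by rw [zero_pow hK0]; omega) hstart
  obtain ⟨hf0, hfle, hflt⟩ := hB
  set f := pvBLoop radicand k (PySem.Int.bitLength radicand / k.toNat + 1) 0 with hfdef
  have halt : exact_int_root_alt radicand k
      = if f ^ k.toNat = radicand then some f else none := by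
    simp only [exact_int_root_alt,
      if_neg (by omega : ¬(radicand = 0 ∨ radicand = 1 ∨ k = 1))]
    rw [hediv]
  by_cases hroot : f ^ k.toNat = radicand
  · -- an exact root exists: both return some f
    have hf2 : 2 ≤ f := by
      rcases lt_trichotomy f 2 with hlt | _ | _
      · interval_cases f
        · rw [zero_pow hK0] at hroot; omega
        · rw [one_pow] at hroot; omega
      · omega
      · omega
    have hpowle : (2:Int) ^ k.toNat ≤ radicand := by
      rw [← hroot]
      exact pow_le_pow_left₀ (by norm_num) hf2 k.toNat
    have hkrad : k < radicand := by
      have h6 : k.toNat < 2 ^ k.toNat := Nat.lt_two_pow_self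
      have h7 : ((k.toNat : Nat) : Int) < ((2 ^ k.toNat : Nat) : Int) := by exact_mod_cast h6
      have h8 : ((2 ^ k.toNat : Nat) : Int) = (2:Int) ^ k.toNat := by push_cast; ring
      omega
    have hfrad : f < radicand := by
      have h9 : f ^ 2 ≤ f ^ k.toNat := pow_le_pow_right₀ (by omega) hK2
      have h10 : f * f ≤ f ^ k.toNat := by rw [← sq]; exact h9
      nlinarith
    rw [halt, if_pos hroot]
    simp only [exact_int_root, if_neg h01, if_neg hk1,
      if_neg (by push Not; constructor <;> omega : ¬(k ≥ radicand ∨ 2 ^ k.toNat > radicand))]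
    exact pvALoop_some radicand k hK0 f hf0 hroot 0 radicand le_rfl hf0 hfrad
  · -- no exact root: both return none
    have hnone : ∀ r : Int, 0 ≤ r → r ^ k.toNat ≠ radicand := by
      intro r hr0 hr
      exact hroot ((pv_root_unique k.toNat hK0 radicand f r hf0 hfle hflt hr0 hr) ▸ hr)
    rw [halt, if_neg hroot]
    simp only [exact_int_root, if_neg h01, if_neg hk1]
    split_ifs with hguard
    · rfl
    · exact pvALoop_none radicand k hnone 0 radicand le_rfl
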